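-- pv_equiv track=rewrite | github.com/NunaInc/nudl | jupyter/codeutil.py | unindent_doc
-- ===== SOURCE A (Python) =====
-- INDENT = '    '
--
-- def unindent_doc(doc):
--     """Removes the indentation in subsequent lines of docstrings."""
--     lines = doc.split('\n')
--     if not lines:
--         return doc
--     out = [lines[0]]
--     for line in lines[1:]:
--         if line.startswith(INDENT):
--             out.append(line[len(INDENT):])
--         else:
--             out.append(line)
--     return '\n'.join(out)
-- ===== SOURCE B (Python) =====
-- INDENT = '    '
--
-- def unindent_doc(doc):
--     """Removes the indentation in subsequent lines of docstrings."""
--     return doc.replace('\n' + INDENT, '\n')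
-- ===== Notes on version B (the rewrite author's own statement) =====
-- stated objective: simpler
-- what changed: Replaces A's split-into-lines / per-line startswith-and-strip loop / rejoin with a single non-overlapping str.replace of newline+INDENT by a bare newline, exploiting that a subsequent line starting with INDENT is exactly an occurrence of INDENT right after a newline.
import Mathlib
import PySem

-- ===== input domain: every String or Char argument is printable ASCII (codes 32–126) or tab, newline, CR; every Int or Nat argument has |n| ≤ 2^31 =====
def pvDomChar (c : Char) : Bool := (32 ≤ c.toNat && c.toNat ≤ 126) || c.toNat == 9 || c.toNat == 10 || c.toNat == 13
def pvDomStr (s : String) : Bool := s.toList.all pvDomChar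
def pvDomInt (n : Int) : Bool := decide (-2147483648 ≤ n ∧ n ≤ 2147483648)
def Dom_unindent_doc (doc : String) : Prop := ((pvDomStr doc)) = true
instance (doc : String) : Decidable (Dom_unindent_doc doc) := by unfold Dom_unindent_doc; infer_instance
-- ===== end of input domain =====

-- B replaces A's split/scan/join loop by a single non-overlapping replace of newline+INDENT with a bare newline (objective: simpler).


-- ===== PORT A =====
def pvINDENT : String := "    "

def unindent_doc (doc : String) : String :=
  match PySem.Str.split? doc "\n" with
  | none => doc            -- unreachable: the separator "\n" is nonempty
  | some [] => doc         -- Python's 'if not lines: return doc'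
  | some (l0 :: rest) =>
      PySem.Str.join "\n"
        (l0 :: rest.map (fun line =>
          if PySem.Str.startswith line pvINDENT then
            PySem.Str.slice line (some (PySem.Str.len pvINDENT)) none
          else line))

-- ===== PORT B =====
def unindent_doc_alt (doc : String) : String :=
  PySem.Str.replace doc ("\n" ++ pvINDENT) "\n"

-- ===== PRECONDITION & SPEC =====
def Spec_unindent_doc (doc : String) (out : String) : Prop := out = unindent_doc_alt doc
instance (doc : String) (out : String) : Decidable (Spec_unindent_doc doc out) := by unfold Spec_unindent_doc; infer_instance

-- ===== CLAIM (what is proved, stated in full; the proofs are below) =====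
def Claim_equal_unindent_doc : Prop := ∀ (doc : String), Dom_unindent_doc doc → Spec_unindent_doc doc (unindent_doc doc)

-- ===== LEMMAS AND PROOFS =====

-- the pattern "\n    " as a char list
def pvPat : List Char := '\n' :: ' ' :: ' ' :: ' ' :: ' ' :: []

-- structural reference function: strip one 4-space indent after every newline
def pvG : List Char → List Char
  | [] => []
  | c :: t =>
      if pvPat.isPrefixOf (c :: t) then '\n' :: pvG (t.drop 4) else c :: pvG t
termination_by l => l.length
decreasing_by
  all_goals simp

-- structural split on '\n'
def pvSp : List Char → List (List Char)
  | [] => [[]]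
  | c :: t => if c = '\n' then [] :: pvSp t else (pvSp t).modifyHead (c :: ·)

-- A's per-line strip
def pvF (l : List Char) : List Char :=
  if (' ' :: ' ' :: ' ' :: ' ' :: []).isPrefixOf l then l.drop 4 else l

theorem pvSp_ne_nil (l : List Char) : pvSp l ≠ [] := by
  induction l with
  | nil => simp [pvSp]
  | cons c t ih =>
    simp only [pvSp]
    split
    · simp
    · cases h : pvSp t with
      | nil => exact absurd h ih
      | cons a r => simp

theorem pvSp_head_prefix (l : List Char) : (pvSp l).headI <+: l := by
  induction l with
  | nil => simp [pvSp]
  | cons c t ih =>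
    simp only [pvSp]
    split
    · simp
    · cases h : pvSp t with
      | nil => exact absurd h (pvSp_ne_nil t)
      | cons a r =>
        have ih' : a <+: t := by rw [h] at ih; simpa using ih
        have hcc : (c :: a) <+: (c :: t) := List.cons_prefix_cons.mpr ⟨rfl, ih'⟩
        simpa [h] using hcc

theorem pvReplace_go_eq (fuel : Nat) :
    ∀ (l acc : List Char), l.length ≤ fuel →
      PySem.Chars.replace.go pvPat ['\n'] fuel l acc = acc.reverse ++ pvG l := by
  induction fuel with
  | zero =>
    intro l acc h
    have : l = [] := List.length_eq_zero_iff.mp (Nat.le_zero.mp h)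
    subst this
    simp [PySem.Chars.replace.go, pvG]
  | succ fuel ih =>
    intro l acc h
    cases l with
    | nil => simp [PySem.Chars.replace.go, pvG]
    | cons c t =>
      rw [PySem.Chars.replace.go]
      by_cases hp : pvPat.isPrefixOf (c :: t)
      · rw [if_pos hp]
        have hdrop : List.drop pvPat.length (c :: t) = t.drop 4 := by
          simp [pvPat]
        rw [hdrop, ih (t.drop 4) _ (by simp at h ⊢; omega)]
        simp [pvG, hp]
      · rw [if_neg hp]
        rw [ih t _ (by simp at h; omega)]
        simp [pvG, hp]

theorem pvSplitOn_go_eq (fuel : Nat) :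
    ∀ (l cur : List Char) (acc : List (List Char)), l.length < fuel →
      PySem.Chars.splitOn.go ['\n'] fuel l cur acc
        = acc.reverse ++ (pvSp l).modifyHead (cur.reverse ++ ·) := by
  induction fuel with
  | zero => intro l cur acc h; omega
  | succ fuel ih =>
    intro l cur acc h
    cases l with
    | nil => simp [PySem.Chars.splitOn.go, pvSp]
    | cons c t =>
      rw [PySem.Chars.splitOn.go]
      by_cases hc : c = '\n'
      · have hp : List.isPrefixOf ['\n'] (c :: t) = true := by
          simp [List.isPrefixOf, hc]
        rw [if_pos hp]
        have hdrop : List.drop (['\n'] : List Char).length (c :: t) = t := by simp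
        rw [hdrop, ih t [] _ (by simp at h; omega)]
        cases hsp : pvSp t with
        | nil => exact absurd hsp (pvSp_ne_nil t)
        | cons a r => simp [pvSp, hc, hsp]
      · have hp : ¬ List.isPrefixOf ['\n'] (c :: t) = true := by
          simp [List.isPrefixOf]
          exact fun hh => absurd hh.symm hc
        rw [if_neg hp]
        rw [ih t (c :: cur) acc (by simp at h; omega)]
        simp only [pvSp, if_neg hc, List.modifyHead_modifyHead]
        congr 2
        funext x
        simp
  
theorem pvSplitOn_eq (l : List Char) : PySem.Chars.splitOn l ['\n'] = pvSp l := by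
  unfold PySem.Chars.splitOn
  rw [pvSplitOn_go_eq (l.length + 1) l [] [] (by omega)]
  simp
  cases h : pvSp l with
  | nil => exact absurd h (pvSp_ne_nil l)
  | cons a r => simp

theorem pvIntercalate_flat (t : List (List Char)) (h : List Char) :
    List.intercalate ['\n'] (h :: t) = h ++ t.flatMap (fun x => '\n' :: x) := by
  induction t generalizing h with
  | nil => simp [List.intercalate]
  | cons b t ih =>
    simp [List.intercalate, List.intersperse] at *
    simp [ih]

-- main bridge: B's scan equals head-untouched, per-tail-line-stripped join of A
theorem pvG_eq_split (l : List Char) :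
    pvG l = (pvSp l).headI ++ ((pvSp l).tail.map pvF).flatMap (fun x => '\n' :: x) := by
  induction hn : l.length using Nat.strong_induction_on generalizing l with
  | _ n ih =>
  cases l with
  | nil => simp [pvG, pvSp]
  | cons c t =>
    by_cases hp : pvPat.isPrefixOf (c :: t)
    · -- c = '\n' and t starts with four spaces
      have hc : c = '\n' := by
        simp [pvPat, List.isPrefixOf] at hp
        exact hp.1.symm
      obtain ⟨u, hu⟩ : ∃ u, t = ' ' :: ' ' :: ' ' :: ' ' :: u := by
        have hp' := hp
        simp [pvPat, List.isPrefixOf] at hp'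
        obtain ⟨-, h1⟩ := hp'
        obtain ⟨u, hu⟩ := h1
        exact ⟨u, hu.symm⟩
      subst hc hu
      have hdrop : ((' ' :: ' ' :: ' ' :: ' ' :: u).drop 4) = u := rfl
      rw [pvG, if_pos hp, hdrop]
      rw [ih u.length (by subst hn; simp; omega) u rfl]
      -- compute pvSp of the RHS list
      cases hsp : pvSp u with
      | nil => exact absurd hsp (pvSp_ne_nil u)
      | cons hu' ru =>
        simp [pvSp, hsp, pvF, List.isPrefixOf]
    · rw [pvG, if_neg hp]
      by_cases hc : c = '\n'
      · subst hc
        -- t does not start with INDENT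
        have ht : ¬ (' ' :: ' ' :: ' ' :: ' ' :: []).isPrefixOf t = true := by
          intro hh
          apply hp
          simp [pvPat]
          simpa using hh
        rw [ih t.length (by subst hn; simp) t rfl]
        cases hsp : pvSp t with
        | nil => exact absurd hsp (pvSp_ne_nil t)
        | cons h' r =>
          -- head of pvSp t is a prefix of t, so it does not start with INDENT either
          have hpre : h' <+: t := by
            have := pvSp_head_prefix t
            rw [hsp] at this; simpa using this
          have hh' : ¬ (' ' :: ' ' :: ' ' :: ' ' :: []).isPrefixOf h' = true := by
            intro hh
            apply ht
            have h1 : (' ' :: ' ' :: ' ' :: ' ' :: []) <+: h' := by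
              exact List.isPrefixOf_iff_prefix.mp hh
            exact List.isPrefixOf_iff_prefix.mpr (h1.trans hpre)
          simp [pvSp, hsp, pvF, hh']
      · rw [ih t.length (by subst hn; simp) t rfl]
        cases hsp : pvSp t with
        | nil => exact absurd hsp (pvSp_ne_nil t)
        | cons h' r => simp [pvSp, hc, hsp]

theorem pvReplace_eq (l : List Char) :
    PySem.Chars.replace l pvPat ['\n'] = pvG l := by
  unfold PySem.Chars.replace
  rw [if_neg (by simp [pvPat])]
  rw [pvReplace_go_eq l.length l [] (le_refl _)]
  simp

-- per-line: A's Str-level strip equals pvF on char lists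
theorem pvLine_eq (x : List Char) :
    (if PySem.Str.startswith (String.ofList x) pvINDENT then
       PySem.Str.slice (String.ofList x) (some (PySem.Str.len pvINDENT)) none
     else (String.ofList x)).toList = pvF x := by
  by_cases hh : (' ' :: ' ' :: ' ' :: ' ' :: []).isPrefixOf x = true
  · have hsw : PySem.Str.startswith (String.ofList x) pvINDENT = true := by
      simp [PySem.Str.startswith, PySem.Chars.startswith, pvINDENT]
      exact List.isPrefixOf_iff_prefix.mp hh
    rw [if_pos hsw, PySem.Str.toList_slice]
    have hlen : PySem.Str.len pvINDENT = ((4 : Nat) : Int) := by decide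
    rw [hlen]
    simp only [String.toList_ofList, PySem.Chars.slice_eq_listSlice, PySem.List.slice_from_natCast]
    simp [pvF, hh]
  · have hsw : ¬ PySem.Str.startswith (String.ofList x) pvINDENT = true := by
      simp [PySem.Str.startswith, PySem.Chars.startswith, pvINDENT]
      intro hc
      exact hh (List.isPrefixOf_iff_prefix.mpr hc)
    rw [if_neg hsw]
    simp [pvF, hh]

-- ===== VERDICT (by name: the statement is the Claim_ definition above) =====
theorem unindent_doc_spec : Claim_equal_unindent_doc := by
  intro doc _
  unfold Spec_unindent_doc unindent_doc unindent_doc_alt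
  have hsplit : PySem.Str.split? doc "\n"
      = some ((PySem.Chars.splitOn doc.toList ['\n']).map String.ofList) := by
    unfold PySem.Str.split? PySem.Chars.split?
    simp
  rw [hsplit, pvSplitOn_eq]
  cases hsp : pvSp doc.toList with
  | nil => exact absurd hsp (pvSp_ne_nil doc.toList)
  | cons h r =>
    simp only [List.map_cons]
    apply String.toList_inj.mp
    rw [PySem.Str.toList_join, PySem.Str.toList_replace]
    have hpat : ("\n" ++ pvINDENT).toList = pvPat := by decide
    have hnl : ("\n" : String).toList = ['\n'] := by decide
    rw [hpat, hnl, pvReplace_eq, pvG_eq_split, hsp]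
    simp only [List.headI, List.tail_cons]
    unfold PySem.Chars.join
    rw [List.map_cons, List.map_map, String.toList_ofList]
    rw [pvIntercalate_flat]
    congr 1
    congr 1
    rw [List.map_map]
    refine List.map_congr_left (fun x _ => ?_)
    have := pvLine_eq x
    simpa [Function.comp] using this
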